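-- pv_equiv track=rewrite | github.com/AA-Turner/top-pypi-sdists-full | extracted/ha/hahomematic/hahomematic/support.py | element_matches_key
-- ===== SOURCE A (Python) =====
-- from collections.abc import Callable, Collection, Set as AbstractSet
--
-- def element_matches_key(
--     search_elements: str | Collection[str],
--     compare_with: str | None,
--     search_key: str | None = None,
--     ignore_case: bool = True,
--     do_left_wildcard_search: bool = False,
--     do_right_wildcard_search: bool = True,
-- ) -> bool:
--     """
--     Return if collection element is key.
--
--     Default search uses a right wildcard.
--     A set search_key assumes that search_elements is initially a dict,
--     and it tries to identify a matching key (wildcard) in the dict keys to use it on the dict.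
--     """
--     if compare_with is None or not search_elements:
--         return False
--
--     compare_with = compare_with.lower() if ignore_case else compare_with
--
--     if isinstance(search_elements, str):
--         element = search_elements.lower() if ignore_case else search_elements
--         if do_left_wildcard_search is True and do_right_wildcard_search is True:
--             return element in compare_with
--         if do_left_wildcard_search:
--             return compare_with.endswith(element)
--         if do_right_wildcard_search:
--             return compare_with.startswith(element)
--         return compare_with == element
--     if isinstance(search_elements, Collection):
--         if isinstance(search_elements, dict) and (
--             match_key := _get_search_key(search_elements=search_elements, search_key=search_key) if search_key else None
--         ):
--             if (elements := search_elements.get(match_key)) is None: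
--                 return False
--             search_elements = elements
--         for item in search_elements:
--             element = item.lower() if ignore_case else item
--             if do_left_wildcard_search is True and do_right_wildcard_search is True:
--                 if element in compare_with:
--                     return True
--             elif do_left_wildcard_search:
--                 if compare_with.endswith(element):
--                     return True
--             elif do_right_wildcard_search:
--                 if compare_with.startswith(element):
--                     return True
--             elif compare_with == element:
--                 return True
--     return False
--
-- def _get_search_key(search_elements: Collection[str], search_key: str) -> str | None:
--     """Search for a matching key in a collection."""
--     for element in search_elements:
--         if search_key.startswith(element):
--             return element
--     return None
-- ===== SOURCE B (Python) =====
-- def element_matches_key(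
--     search_elements,
--     compare_with,
--     search_key=None,
--     ignore_case=True,
--     do_left_wildcard_search=False,
--     do_right_wildcard_search=True,
-- ):
--     """Inverted search: index the elements in a hash set (plus the set of their
--     lengths) and probe that index with slices of compare_with, instead of
--     running a string comparison per element against compare_with."""
--     if compare_with is None or not search_elements:
--         return False
--     cw = compare_with.lower() if ignore_case else compare_with
--     n = len(cw)
--     if isinstance(search_elements, str):
--         elements = [search_elements]
--     elif isinstance(search_elements, dict) and search_key:
--         key = next((k for k in search_elements if search_key.startswith(k)), None)
--         if key:
--             elements = search_elements.get(key)
--             if elements is None: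
--                 return False
--         else:
--             elements = search_elements
--     else:
--         elements = search_elements
--     index = {e.lower() if ignore_case else e for e in elements}
--     if do_left_wildcard_search and do_right_wildcard_search:
--         lengths = {len(e) for e in index}
--         return any(
--             cw[i:i + L] in index
--             for L in lengths if L <= n
--             for i in range(n - L + 1)
--         )
--     if do_left_wildcard_search:
--         return any(cw[n - L:] in index for L in {len(e) for e in index} if L <= n)
--     if do_right_wildcard_search:
--         return any(cw[:L] in index for L in {len(e) for e in index} if L <= n)
--     return cw in index
-- ===== Notes on version B (the rewrite author's own statement) =====
-- stated objective: alternative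
-- what changed: B inverts the search: instead of running a per-element prefix/suffix/substring comparison against compare_with, it builds a hash-set index of the normalized elements (and the set of their lengths) once and probes that index with the corresponding slices of compare_with (prefixes, suffixes, substrings of the indexed lengths, or the whole string).
import Mathlib
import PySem

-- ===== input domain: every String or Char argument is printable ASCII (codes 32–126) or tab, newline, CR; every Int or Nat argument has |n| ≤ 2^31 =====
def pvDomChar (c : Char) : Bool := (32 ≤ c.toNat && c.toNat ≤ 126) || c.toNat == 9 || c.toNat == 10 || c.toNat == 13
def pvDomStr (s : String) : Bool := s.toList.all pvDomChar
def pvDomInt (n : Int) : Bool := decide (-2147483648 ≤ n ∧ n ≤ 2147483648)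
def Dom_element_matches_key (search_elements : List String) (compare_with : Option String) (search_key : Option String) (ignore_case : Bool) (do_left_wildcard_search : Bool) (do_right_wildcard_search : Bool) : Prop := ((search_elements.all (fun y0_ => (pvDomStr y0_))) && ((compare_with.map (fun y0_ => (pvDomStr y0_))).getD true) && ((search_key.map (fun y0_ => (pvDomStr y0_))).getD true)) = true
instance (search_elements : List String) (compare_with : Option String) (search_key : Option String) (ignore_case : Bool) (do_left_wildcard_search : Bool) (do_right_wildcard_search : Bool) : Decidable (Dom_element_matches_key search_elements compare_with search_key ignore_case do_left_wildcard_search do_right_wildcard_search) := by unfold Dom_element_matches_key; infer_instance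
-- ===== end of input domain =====

-- ===== PORT A =====
-- B replaces A's per-element string comparisons by a hash-set index of the elements probed with
-- slices of compare_with; equivalence is about the return value only.
-- A's per-element loop, branches in the Python order (the dict branch of A never fires for a List String input).
def emkLoopA (cw : String) (ignore_case do_left do_right : Bool) : List String → Bool
  | [] => false
  | item :: rest =>
    let element := if ignore_case then PySem.Str.lower item else item
    if do_left && do_right then
      if PySem.Str.isIn element cw then true else emkLoopA cw ignore_case do_left do_right rest
    else if do_left then
      if PySem.Str.endswith cw element then true else emkLoopA cw ignore_case do_left do_right rest
    else if do_right then
      if PySem.Str.startswith cw element then true else emkLoopA cw ignore_case do_left do_right rest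
    else if cw == element then true else emkLoopA cw ignore_case do_left do_right rest

def element_matches_key (search_elements : List String) (compare_with : Option String) (search_key : Option String) (ignore_case : Bool) (do_left_wildcard_search : Bool) (do_right_wildcard_search : Bool) : Bool :=
  match compare_with with
  | none => false
  | some cw0 =>
    if search_elements = [] then false
    else
      let cw := if ignore_case then PySem.Str.lower cw0 else cw0
      emkLoopA cw ignore_case do_left_wildcard_search do_right_wildcard_search search_elements

-- ===== PORT B =====
def element_matches_key_alt (search_elements : List String) (compare_with : Option String) (search_key : Option String) (ignore_case : Bool) (do_left_wildcard_search : Bool) (do_right_wildcard_search : Bool) : Bool :=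
  match compare_with with
  | none => false
  | some cw0 =>
    if search_elements.isEmpty then false
    else
      let cw := if ignore_case then PySem.Str.lower cw0 else cw0
      let n := PySem.Str.len cw
      let index : PySem.Set String :=
        PySem.Set.ofList (search_elements.map
          (fun e => if ignore_case then PySem.Str.lower e else e))
      if do_left_wildcard_search && do_right_wildcard_search then
        let lengths : PySem.Set Int := PySem.Set.ofList (index.map PySem.Str.len)
        lengths.any (fun L => decide (L ≤ n) &&
          (PySem.List.pyRange 0 (n - L + 1) 1).any (fun i =>
            PySem.Set.contains index (PySem.Str.slice cw (some i) (some (i + L)))))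
      else if do_left_wildcard_search then
        (PySem.Set.ofList (index.map PySem.Str.len)).any (fun L => decide (L ≤ n) &&
          PySem.Set.contains index (PySem.Str.slice cw (some (n - L)) none))
      else if do_right_wildcard_search then
        (PySem.Set.ofList (index.map PySem.Str.len)).any (fun L => decide (L ≤ n) &&
          PySem.Set.contains index (PySem.Str.slice cw none (some L)))
      else
        PySem.Set.contains index cw

-- ===== PRECONDITION & SPEC =====
def Spec_element_matches_key (search_elements : List String) (compare_with : Option String) (search_key : Option String) (ignore_case : Bool) (do_left_wildcard_search : Bool) (do_right_wildcard_search : Bool) (out : Bool) : Prop := out = element_matches_key_alt search_elements compare_with search_key ignore_case do_left_wildcard_search do_right_wildcard_search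
instance (search_elements : List String) (compare_with : Option String) (search_key : Option String) (ignore_case : Bool) (do_left_wildcard_search : Bool) (do_right_wildcard_search : Bool) (out : Bool) : Decidable (Spec_element_matches_key search_elements compare_with search_key ignore_case do_left_wildcard_search do_right_wildcard_search out) := by unfold Spec_element_matches_key; infer_instance

-- ===== CLAIM (what is proved, stated in full; the proofs are below) =====
def Claim_equal_element_matches_key : Prop := ∀ (search_elements : List String) (compare_with : Option String) (search_key : Option String) (ignore_case : Bool) (do_left_wildcard_search : Bool) (do_right_wildcard_search : Bool), Dom_element_matches_key search_elements compare_with search_key ignore_case do_left_wildcard_search do_right_wildcard_search → Spec_element_matches_key search_elements compare_with search_key ignore_case do_left_wildcard_search do_right_wildcard_search (element_matches_key search_elements compare_with search_key ignore_case do_left_wildcard_search do_right_wildcard_search)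

-- ===== LEMMAS AND PROOFS =====

-- A's loop is an `any` of the per-mode test over the normalized elements
lemma emkLoopA_eq_any (cw : String) (ic dl dr : Bool) (xs : List String) :
    emkLoopA cw ic dl dr xs =
      xs.any (fun item =>
        let e := if ic then PySem.Str.lower item else item
        if dl && dr then PySem.Str.isIn e cw
        else if dl then PySem.Str.endswith cw e
        else if dr then PySem.Str.startswith cw e
        else cw == e) := by
  induction xs with
  | nil => simp [emkLoopA]
  | cons h t ih =>
    simp only [emkLoopA, List.any_cons, ih]
    cases dl <;> cases dr <;> simp <;> tauto

-- the four mode lemmas: A's any-of-test equals B's probe of the element index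
lemma emk_mode_eq (xs : List String) (cw : String) (f : String → String) :
    (xs.any fun item => cw == f item) =
      PySem.Set.contains (PySem.Set.ofList (xs.map f)) cw := by
  rw [Bool.eq_iff_iff]
  simp only [List.any_eq_true, beq_iff_eq, PySem.Set.contains, List.contains_iff_mem,
    PySem.Set.mem_ofList, List.mem_map]
  constructor
  · rintro ⟨e, he, rfl⟩; exact ⟨e, he, rfl⟩
  · rintro ⟨e, he, rfl⟩; exact ⟨e, he, rfl⟩

lemma emk_mode_right (xs : List String) (cw : String) (f : String → String) :
    (xs.any fun item => PySem.Str.startswith cw (f item)) =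
      ((PySem.Set.ofList ((PySem.Set.ofList (xs.map f)).map PySem.Str.len)).any
        (fun L => decide (L ≤ PySem.Str.len cw) &&
          PySem.Set.contains (PySem.Set.ofList (xs.map f)) (PySem.Str.slice cw none (some L)))) := by
  rw [Bool.eq_iff_iff]
  simp only [List.any_eq_true, Bool.and_eq_true, decide_eq_true_eq, PySem.Set.contains,
    List.contains_iff_mem, PySem.Set.mem_ofList, List.mem_map, PySem.Str.startswith_eq,
    PySem.Chars.startswith_iff, PySem.Str.len_eq]
  constructor
  · rintro ⟨e, he, hp⟩
    refine ⟨PySem.Str.len (f e), ⟨f e, ⟨e, he, rfl⟩, (PySem.Str.len_eq _).symm ▸ rfl⟩, ?_, ?_⟩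
    · rw [PySem.Str.len_eq]; exact_mod_cast hp.length_le
    · refine ⟨e, he, ?_⟩
      apply String.toList_inj.mp
      rw [PySem.Str.toList_slice, PySem.Chars.slice_eq_listSlice, PySem.Str.len_eq,
        PySem.List.slice_to_natCast]
      exact List.prefix_iff_eq_take.mp hp
  · rintro ⟨L, hL, hLn, e, he, hfe⟩
    refine ⟨e, he, ?_⟩
    rw [hfe, PySem.Str.toList_slice, PySem.Chars.slice_eq_listSlice]
    obtain ⟨y, hy, rfl⟩ := hL
    rw [PySem.List.slice_to_natCast]
    exact List.take_prefix _ _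

lemma emk_mode_left (xs : List String) (cw : String) (f : String → String) :
    (xs.any fun item => PySem.Str.endswith cw (f item)) =
      ((PySem.Set.ofList ((PySem.Set.ofList (xs.map f)).map PySem.Str.len)).any
        (fun L => decide (L ≤ PySem.Str.len cw) &&
          PySem.Set.contains (PySem.Set.ofList (xs.map f))
            (PySem.Str.slice cw (some (PySem.Str.len cw - L)) none))) := by
  rw [Bool.eq_iff_iff]
  simp only [List.any_eq_true, Bool.and_eq_true, decide_eq_true_eq, PySem.Set.contains,
    List.contains_iff_mem, PySem.Set.mem_ofList, List.mem_map, PySem.Str.endswith_eq,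
    PySem.Chars.endswith_iff]
  constructor
  · rintro ⟨e, he, hp⟩
    refine ⟨PySem.Str.len (f e), ⟨f e, ⟨e, he, rfl⟩, rfl⟩, ?_, ?_⟩
    · rw [PySem.Str.len_eq, PySem.Str.len_eq]; exact_mod_cast hp.length_le
    · refine ⟨e, he, ?_⟩
      apply String.toList_inj.mp
      rw [PySem.Str.toList_slice, PySem.Chars.slice_eq_listSlice, PySem.Str.len_eq,
        PySem.Str.len_eq]
      have hc : (cw.toList.length : Int) - ((f e).toList.length : Int) =
          ((cw.toList.length - (f e).toList.length : Nat) : Int) := by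
        have := hp.length_le; omega
      rw [hc, PySem.List.slice_from_natCast]
      exact List.suffix_iff_eq_drop.mp hp
  · rintro ⟨L, hL, hLn, e, he, hfe⟩
    refine ⟨e, he, ?_⟩
    rw [hfe, PySem.Str.toList_slice, PySem.Chars.slice_eq_listSlice]
    obtain ⟨y, hy, rfl⟩ := hL
    rw [PySem.Str.len_eq, PySem.Str.len_eq] at *
    have hc : (cw.toList.length : Int) - (y.toList.length : Int) =
        ((cw.toList.length - y.toList.length : Nat) : Int) := by
      omega
    rw [hc, PySem.List.slice_from_natCast]
    exact List.drop_suffix _ _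

lemma emk_mode_both (xs : List String) (cw : String) (f : String → String) :
    (xs.any fun item => PySem.Str.isIn (f item) cw) =
      ((PySem.Set.ofList ((PySem.Set.ofList (xs.map f)).map PySem.Str.len)).any
        (fun L => decide (L ≤ PySem.Str.len cw) &&
          (PySem.List.pyRange 0 (PySem.Str.len cw - L + 1) 1).any (fun i =>
            PySem.Set.contains (PySem.Set.ofList (xs.map f))
              (PySem.Str.slice cw (some i) (some (i + L)))))) := by
  rw [Bool.eq_iff_iff]
  simp only [List.any_eq_true, Bool.and_eq_true, decide_eq_true_eq, PySem.Set.contains,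
    List.contains_iff_mem, PySem.Set.mem_ofList, List.mem_map, PySem.Str.isIn_iff_infix]
  constructor
  · rintro ⟨e, he, hp⟩
    obtain ⟨s, t, hst⟩ := hp
    refine ⟨PySem.Str.len (f e), ⟨f e, ⟨e, he, rfl⟩, rfl⟩, ?_,
      (s.length : Int), ?_, e, he, ?_⟩
    · rw [PySem.Str.len_eq, PySem.Str.len_eq, ← hst]
      simp only [List.length_append]; push_cast; omega
    · rw [PySem.List.mem_pyRange_one, PySem.Str.len_eq, PySem.Str.len_eq, ← hst]
      simp only [List.length_append]; push_cast; omega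
    · apply String.toList_inj.mp
      rw [PySem.Str.toList_slice, PySem.Chars.slice_eq_listSlice, PySem.Str.len_eq]
      have hc : (s.length : Int) + ((f e).toList.length : Int) =
          ((s.length + (f e).toList.length : Nat) : Int) := by push_cast; ring
      rw [hc, PySem.List.slice_natCast, ← hst, List.append_assoc, List.drop_left]
      simp
  · rintro ⟨L, hL, hLn, i, hi, e, he, hfe⟩
    rw [PySem.List.mem_pyRange_one] at hi
    refine ⟨e, he, ?_⟩
    rw [hfe, PySem.Str.toList_slice, PySem.Chars.slice_eq_listSlice]
    obtain ⟨y, hy, rfl⟩ := hL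
    have hL0 : (0 : Int) ≤ PySem.Str.len y := by rw [PySem.Str.len_eq]; positivity
    rw [PySem.List.slice_toNat cw.toList hi.1 (by omega)]
    exact ((List.take_prefix _ _).isInfix.trans (List.drop_suffix _ _).isInfix)

-- ===== VERDICT (by name: the statement is the Claim_ definition above) =====
theorem element_matches_key_spec : Claim_equal_element_matches_key := by
  intro se cw sk ic dl dr _
  unfold Spec_element_matches_key element_matches_key element_matches_key_alt
  cases cw with
  | none => rfl
  | some c =>
    simp only [List.isEmpty_iff, emkLoopA_eq_any]
    cases dl <;> cases dr <;>
      simp only [Bool.and_self, Bool.and_false, Bool.false_and,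
        Bool.false_eq_true, if_false, if_true]
    · rw [emk_mode_eq]
    · rw [emk_mode_right]
    · rw [emk_mode_left]
    · rw [emk_mode_both]
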